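-- pv_equiv track=rewrite | github.com/jkall/qgis-midvatten-plugin | tools/utils/midvatten_utils.py | compare_verson_lists
-- ===== SOURCE A (Python) =====
-- def compare_verson_lists(testlist, reflist):
--     is_old = False
--     for idx, testval in enumerate(testlist):
--         try:
--             refval = reflist[idx]
--         except IndexError:
--             is_old = True
--             break
--         else:
--             if refval > testval:
--                 is_old = True
--                 break
--     return is_old
-- ===== SOURCE B (Python) =====
-- def compare_verson_lists(testlist, reflist):
--     if len(testlist) > len(reflist):
--         return True
--     diffs = [refval - testval for testval, refval in zip(testlist, reflist)]
--     return max(diffs, default=0) > 0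
-- ===== Notes on version B (the rewrite author's own statement) =====
-- stated objective: alternative
-- what changed: Replaces A's early-exit indexing loop with try/except by a staged computation: an explicit length comparison, then a full element-wise difference list whose maximum (default 0) is tested for positivity, so there is no per-element branch, early exit or exception handling.
import Mathlib
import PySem

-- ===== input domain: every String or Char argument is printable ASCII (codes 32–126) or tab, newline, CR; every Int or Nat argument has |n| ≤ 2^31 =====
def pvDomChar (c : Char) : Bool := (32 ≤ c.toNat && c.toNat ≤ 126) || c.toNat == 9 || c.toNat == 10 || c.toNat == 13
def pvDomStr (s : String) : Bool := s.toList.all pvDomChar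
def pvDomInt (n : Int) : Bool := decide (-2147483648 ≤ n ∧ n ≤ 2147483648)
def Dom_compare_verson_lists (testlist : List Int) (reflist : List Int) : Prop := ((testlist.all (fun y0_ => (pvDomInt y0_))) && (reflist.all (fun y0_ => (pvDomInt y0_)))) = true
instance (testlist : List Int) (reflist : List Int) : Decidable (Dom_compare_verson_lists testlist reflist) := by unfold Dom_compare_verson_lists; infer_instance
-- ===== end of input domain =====

-- B replaces A's early-exit indexing loop (try/except IndexError) by a staged computation:
-- a length comparison, then the maximum of the element-wise difference list tested for
-- positivity (alternative decomposition; same cost; return value only).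

-- ===== PORT A =====
-- the 'for idx, testval in enumerate(testlist)' loop with break; pyGet? none = the IndexError branch
def cvl_go (reflist : List Int) : List (Int × Int) → Bool
  | [] => false
  | (idx, testval) :: rest =>
    match PySem.List.pyGet? reflist idx with
    | none => true                      -- except IndexError: is_old = True; break
    | some refval => if refval > testval then true else cvl_go reflist rest

def compare_verson_lists (testlist : List Int) (reflist : List Int) : Bool :=
  cvl_go reflist (PySem.List.enumerate testlist)

-- ===== PORT B =====
def compare_verson_lists_alt (testlist : List Int) (reflist : List Int) : Bool :=
  if testlist.length > reflist.length then true
  else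
    -- diffs = [refval - testval for testval, refval in zip(...)]; max(diffs, default=0) > 0
    let diffs := (testlist.zip reflist).map (fun p => p.2 - p.1)
    decide ((PySem.List.max? diffs (fun x => x)).getD 0 > 0)

-- ===== PRECONDITION & SPEC =====
def Spec_compare_verson_lists (testlist : List Int) (reflist : List Int) (out : Bool) : Prop := out = compare_verson_lists_alt testlist reflist
instance (testlist : List Int) (reflist : List Int) (out : Bool) : Decidable (Spec_compare_verson_lists testlist reflist out) := by unfold Spec_compare_verson_lists; infer_instance

-- ===== CLAIM (what is proved, stated in full; the proofs are below) =====
def Claim_equal_compare_verson_lists : Prop := ∀ (testlist : List Int) (reflist : List Int), Dom_compare_verson_lists testlist reflist → Spec_compare_verson_lists testlist reflist (compare_verson_lists testlist reflist)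

-- ===== LEMMAS AND PROOFS =====

-- consuming the head of reflist shifts the enumerate start index by one
lemma cvl_go_shift (t : List Int) (x : Int) (r : List Int) :
    ∀ (s : Nat), cvl_go (x :: r) (PySem.List.enumerate t ((s : Int) + 1)) = cvl_go r (PySem.List.enumerate t (s : Int)) := by
  induction t with
  | nil => intro s; simp [PySem.List.enumerate_nil, cvl_go]
  | cons a t ih =>
    intro s
    rw [PySem.List.enumerate_cons, PySem.List.enumerate_cons]
    simp only [cvl_go, PySem.List.pyGet?_cons_succ]
    have h1 : (s : Int) + 1 + 1 = ((s + 1 : Nat) : Int) + 1 := by push_cast; ring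
    have h2 : (s : Int) + 1 = ((s + 1 : Nat) : Int) := by push_cast; ring
    rw [h1, h2, ih (s + 1)]

-- A's loop computes 'some zipped pair has ref > test, or testlist is longer'
lemma cvl_go_eq_any (t : List Int) :
    ∀ (r : List Int), cvl_go r (PySem.List.enumerate t 0) =
      ((t.zip r).any (fun p => p.2 > p.1) || decide (t.length > r.length)) := by
  induction t with
  | nil =>
    intro r
    simp [PySem.List.enumerate_nil, cvl_go]
  | cons a t ih =>
    intro r
    rw [PySem.List.enumerate_cons]
    cases r with
    | nil =>
      simp [cvl_go, PySem.List.pyGet?, PySem.List.pyIdx?]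
    | cons b r =>
      simp only [cvl_go, PySem.List.pyGet?_zero_cons]
      by_cases hba : b > a
      · simp [hba, List.zip_cons_cons]
      · have h01 : (0 : Int) + 1 = ((0 : Nat) : Int) + 1 := by norm_num
        rw [if_neg (by simpa using hba), h01, cvl_go_shift t b r 0]
        rw [show ((0 : Nat) : Int) = (0 : Int) from rfl, ih r]
        simp only [List.zip_cons_cons, List.any_cons, List.length_cons]
        have : (decide (b > a)) = false := by simpa using hba
        simp [this]

-- the running max of a list of Ints is positive iff some element is positive
lemma foldl_max_pos (l : List Int) :
    ∀ (x : Int), (0 < l.foldl max x) ↔ (0 < x ∨ ∃ y ∈ l, 0 < y) := by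
  induction l with
  | nil => intro x; simp
  | cons a l ih =>
    intro x
    simp only [List.foldl_cons]
    rw [ih (max x a)]
    simp [lt_max_iff]
    tauto

-- max(diffs, default=0) > 0 iff some zipped pair has ref > test
lemma maxD_diffs_eq_any (l : List (Int × Int)) :
    decide ((PySem.List.max? (l.map (fun p => p.2 - p.1)) (fun x => x)).getD 0 > 0) =
      l.any (fun p => p.2 > p.1) := by
  cases l with
  | nil => simp [PySem.List.max?]
  | cons a l =>
    simp only [List.map_cons, PySem.List.max?_id_cons, Option.getD_some]
    rw [Bool.eq_iff_iff]
    simp only [decide_eq_true_eq, List.any_eq_true, foldl_max_pos, List.mem_map,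
      decide_eq_true_eq, List.mem_cons, gt_iff_lt, sub_pos]
    constructor
    · rintro (h | ⟨y, ⟨p, hp, rfl⟩, hy⟩)
      · exact ⟨a, Or.inl rfl, h⟩
      · exact ⟨p, Or.inr hp, by omega⟩
    · rintro ⟨p, (rfl | hp), h⟩
      · exact Or.inl (by omega)
      · exact Or.inr ⟨p.2 - p.1, ⟨p, hp, rfl⟩, by omega⟩

-- ===== VERDICT (by name: the statement is the Claim_ definition above) =====
theorem compare_verson_lists_spec : Claim_equal_compare_verson_lists := by
  intro t r _
  unfold Spec_compare_verson_lists compare_verson_lists compare_verson_lists_alt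
  rw [cvl_go_eq_any t r]
  by_cases hlen : t.length > r.length
  · simp [hlen]
  · simp only [if_neg hlen]
    rw [maxD_diffs_eq_any]
    have : (decide (t.length > r.length)) = false := by simpa using hlen
    simp [this]
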